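-- pv_equiv track=rewrite | github.com/xunmengshe2x/Index-anisora-replicate | anisoraV2_gpu/OSS/OSS.py | cal_medium
-- ===== SOURCE A (Python) =====
-- def cal_medium(oss_steps_all):
--     ave_steps = []
--     for k in range(len(oss_steps_all[0])):
--         l = []
--         for i in range(len(oss_steps_all)):
--             l.append(oss_steps_all[i][k])
--         l.sort()
--         ave_steps.append((l[len(l)//2] + l[len(l)//2 - 1])//2)
--     return ave_steps
-- ===== SOURCE B (Python) =====
-- def cal_medium(oss_steps_all):
--     def select(col, k):
--         # k-th smallest (0-based) by rank counting, no sorting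
--         for x in col:
--             lt = sum(1 for y in col if y < x)
--             eq = sum(1 for y in col if y == x)
--             if lt <= k < lt + eq:
--                 return x
--     result = []
--     for col in zip(*oss_steps_all):
--         j = len(col) // 2
--         result.append((select(col, j) + select(col, max(j - 1, 0))) // 2)
--     return result
-- ===== Notes on version B (the rewrite author's own statement) =====
-- stated objective: alternative
-- what changed: B never sorts: it transposes the matrix once with zip(*...) and picks each column's two middle order statistics by rank counting (an element x is the k-th smallest iff #{y<x} <= k < #{y<=x}), where A rebuilds and fully sorts every column.
import Mathlib
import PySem

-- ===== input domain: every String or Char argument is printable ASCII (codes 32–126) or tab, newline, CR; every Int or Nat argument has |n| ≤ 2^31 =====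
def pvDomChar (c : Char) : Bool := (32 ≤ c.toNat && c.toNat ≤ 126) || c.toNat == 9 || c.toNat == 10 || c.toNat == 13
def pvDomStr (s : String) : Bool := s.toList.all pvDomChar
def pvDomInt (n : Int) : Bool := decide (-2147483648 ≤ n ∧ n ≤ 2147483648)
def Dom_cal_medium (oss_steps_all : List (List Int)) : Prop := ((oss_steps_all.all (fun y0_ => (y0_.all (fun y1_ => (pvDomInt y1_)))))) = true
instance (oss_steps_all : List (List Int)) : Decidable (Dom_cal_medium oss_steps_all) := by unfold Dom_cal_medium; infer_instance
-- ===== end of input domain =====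

-- B replaces A's per-column full sort by a sort-free rank-counting selection of the
-- two middle order statistics, building the columns by a single transpose (objective: alternative).

-- ===== PORT A =====
-- the body of A's outer loop (one k: build column k, sort it in place, append the medium)
def pvLoopA (oss_steps_all : List (List Int)) (ave_steps : List Int) (k : Int) : List Int :=
  let l := (PySem.List.pyRange 0 (oss_steps_all.length : Int) 1).foldl
    (fun l i => l ++ [PySem.List.pyGetD (PySem.List.pyGetD oss_steps_all i []) k 0]) []
  let s := PySem.List.sorted l (fun x => x) false
  ave_steps ++ [PySem.Int.floordiv
    (PySem.List.pyGetD s (PySem.Int.floordiv (s.length : Int) 2) 0 +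
     PySem.List.pyGetD s (PySem.Int.floordiv (s.length : Int) 2 - 1) 0) 2]

def cal_medium (oss_steps_all : List (List Int)) : List Int :=
  (PySem.List.pyRange 0 ((PySem.List.pyGetD oss_steps_all 0 []).length : Int) 1).foldl
    (pvLoopA oss_steps_all) []

-- ===== PORT B =====
-- k-th smallest by rank counting; Python's select falls off (None) when no element
-- qualifies — unreachable for 0 ≤ k < len(col); the `none` branch returns 0 there.
def pvSelect (col : List Int) (k : Int) : Int :=
  match col.find? (fun x =>
      decide ((col.countP (fun y => decide (y < x)) : Int) ≤ k ∧
              k < (col.countP (fun y => decide (y < x)) : Int) +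
                  (col.countP (fun y => decide (y = x)) : Int))) with
  | some x => x
  | none => 0

-- zip(*rows): emit the heads while every row is nonempty
def pvZipStar : List (List Int) → List (List Int)
  | [] => []
  | r :: rs =>
    if (r :: rs).any (fun t => t.isEmpty) then []
    else ((r :: rs).map (fun t => t.headD 0)) :: pvZipStar ((r :: rs).map List.tail)
termination_by rows => (rows.headD []).length
decreasing_by
  simp only [List.headD_cons, List.map_cons]
  rename_i h
  simp only [List.any_cons, Bool.or_eq_true, List.isEmpty_iff] at h
  cases r with
  | nil => exact absurd (Or.inl rfl) h
  | cons a t => simp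

-- the body of B's loop over the columns
def pvLoopB (result : List Int) (col : List Int) : List Int :=
  let j : Int := PySem.Int.floordiv (col.length : Int) 2
  result ++ [PySem.Int.floordiv (pvSelect col j + pvSelect col (max (j - 1) 0)) 2]

def cal_medium_alt (oss_steps_all : List (List Int)) : List Int :=
  (pvZipStar oss_steps_all).foldl pvLoopB []

-- ===== PRECONDITION & SPEC =====
-- Pre_ excludes exactly the inputs where A raises IndexError: the empty list
-- (oss_steps_all[0]) and ragged inputs where some row is shorter than row 0.
def Pre_cal_medium (oss_steps_all : List (List Int)) : Prop :=
  oss_steps_all ≠ [] ∧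
  ∀ r ∈ oss_steps_all, (oss_steps_all.headD []).length ≤ r.length
instance (oss_steps_all : List (List Int)) : Decidable (Pre_cal_medium oss_steps_all) := by
  unfold Pre_cal_medium; infer_instance
def pvWitness_cal_medium : List (List Int) := [[3, 1], [2, 4], [5, 0]]

def Spec_cal_medium (oss_steps_all : List (List Int)) (out : List Int) : Prop := out = cal_medium_alt oss_steps_all
instance (oss_steps_all : List (List Int)) (out : List Int) : Decidable (Spec_cal_medium oss_steps_all out) := by unfold Spec_cal_medium; infer_instance

-- ===== CLAIM (what is proved, stated in full; the proofs are below) =====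
def Claim_equal_cal_medium : Prop := ∀ (oss_steps_all : List (List Int)), Dom_cal_medium oss_steps_all → Pre_cal_medium oss_steps_all → Spec_cal_medium oss_steps_all (cal_medium oss_steps_all)

-- ===== LEMMAS AND PROOFS =====

-- abbreviation used only by the proofs
def pvSorted (col : List Int) : List Int := PySem.List.sorted col (fun x => x) false

theorem pv_countP_lt_add_eq_le (l : List Int) (x : Int) :
    l.countP (fun y => decide (y < x)) + l.countP (fun y => decide (y = x)) =
    l.countP (fun y => decide (y ≤ x)) := by
  induction l with
  | nil => simp
  | cons a t ih =>
    simp only [List.countP_cons]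
    rcases lt_trichotomy a x with h | h | h
    · simp [h, ne_of_lt h, le_of_lt h]; omega
    · subst h; simp; omega
    · simp [not_lt.mpr (le_of_lt h), ne_of_gt h, not_le.mpr h]; omega

-- In sorted(col), the element at index k has rank counts bracketing k.
theorem pv_sorted_rank (col : List Int) (k : Nat) (hk : k < (pvSorted col).length)
    (x : Int) (hx : (pvSorted col)[k] = x) :
    (pvSorted col).countP (fun y => decide (y < x)) ≤ k ∧
    k < (pvSorted col).countP (fun y => decide (y < x)) +
        (pvSorted col).countP (fun y => decide (y = x)) := by
  constructor
  · have hdrop : ((pvSorted col).drop k).countP (fun y => decide (y < x)) = 0 := by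
      rw [List.countP_eq_zero]
      intro y hy
      obtain ⟨i, hi, rfl⟩ := List.mem_iff_getElem.mp hy
      simp only [List.getElem_drop, decide_eq_true_eq, not_lt]
      have hki : k + i < (pvSorted col).length := by
        simp [List.length_drop] at hi; omega
      have hmono : (pvSorted col)[k]'hk ≤ (pvSorted col)[k + i]'hki :=
        PySem.List.sorted_id_getElem_mono col (Nat.le_add_right k i) hki
      exact hx.symm.trans_le hmono
    calc (pvSorted col).countP (fun y => decide (y < x))
        = ((pvSorted col).take k ++ (pvSorted col).drop k).countP (fun y => decide (y < x)) := by
          rw [List.take_append_drop]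
      _ = ((pvSorted col).take k).countP (fun y => decide (y < x)) +
          ((pvSorted col).drop k).countP (fun y => decide (y < x)) := by rw [List.countP_append]
      _ = ((pvSorted col).take k).countP (fun y => decide (y < x)) := by simp [hdrop]
      _ ≤ ((pvSorted col).take k).length := List.countP_le_length
      _ ≤ k := by simp [List.length_take]
  · rw [pv_countP_lt_add_eq_le]
    have htake : ((pvSorted col).take (k + 1)).countP (fun y => decide (y ≤ x)) =
        ((pvSorted col).take (k + 1)).length := by
      rw [List.countP_eq_length]
      intro y hy
      obtain ⟨i, hi, rfl⟩ := List.mem_iff_getElem.mp hy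
      simp only [List.getElem_take, decide_eq_true_eq]
      have hik : i ≤ k := by simp [List.length_take] at hi; omega
      have hmono : (pvSorted col)[i]'(by omega) ≤ (pvSorted col)[k]'hk :=
        PySem.List.sorted_id_getElem_mono col hik hk
      exact hmono.trans_eq hx
    have hlen : ((pvSorted col).take (k + 1)).length = k + 1 := by
      simp [List.length_take]; omega
    calc k < k + 1 := Nat.lt_succ_self k
      _ = ((pvSorted col).take (k + 1)).countP (fun y => decide (y ≤ x)) := by rw [htake, hlen]
      _ ≤ ((pvSorted col).take (k + 1)).countP (fun y => decide (y ≤ x)) +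
          ((pvSorted col).drop (k + 1)).countP (fun y => decide (y ≤ x)) := Nat.le_add_right _ _
      _ = ((pvSorted col).take (k + 1) ++ (pvSorted col).drop (k + 1)).countP
            (fun y => decide (y ≤ x)) := by rw [List.countP_append]
      _ = (pvSorted col).countP (fun y => decide (y ≤ x)) := by rw [List.take_append_drop]

-- Uniqueness of the rank-bracketed value.
theorem pv_rank_unique (col : List Int) (k : Nat) (x z : Int)
    (hx : col.countP (fun y => decide (y < x)) ≤ k ∧
          k < col.countP (fun y => decide (y < x)) + col.countP (fun y => decide (y = x)))
    (hz : col.countP (fun y => decide (y < z)) ≤ k ∧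
          k < col.countP (fun y => decide (y < z)) + col.countP (fun y => decide (y = z))) :
    x = z := by
  rcases lt_trichotomy x z with h | h | h
  · exfalso
    have hmono : col.countP (fun y => decide (y ≤ x)) ≤ col.countP (fun y => decide (y < z)) := by
      apply List.countP_mono_left
      intro a _ ha
      simp only [decide_eq_true_eq] at ha ⊢
      omega
    rw [← pv_countP_lt_add_eq_le] at hmono
    omega
  · exact h
  · exfalso
    have hmono : col.countP (fun y => decide (y ≤ z)) ≤ col.countP (fun y => decide (y < x)) := by
      apply List.countP_mono_left
      intro a _ ha
      simp only [decide_eq_true_eq] at ha ⊢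
      omega
    rw [← pv_countP_lt_add_eq_le] at hmono
    omega

theorem pv_select_eq_sorted (col : List Int) (k : Nat) (hk : k < col.length) :
    pvSelect col (k : Int) = (pvSorted col)[k]'(by simpa [pvSorted] using hk) := by
  have hks : k < (pvSorted col).length := by simpa [pvSorted] using hk
  have hperm : (pvSorted col).Perm col := PySem.List.sorted_perm col (fun x => x) false
  have hrank := pv_sorted_rank col k hks ((pvSorted col)[k]'hks) rfl
  rw [hperm.countP_eq, hperm.countP_eq] at hrank
  have hx0mem : (pvSorted col)[k]'hks ∈ col := hperm.mem_iff.mp (List.getElem_mem hks)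
  unfold pvSelect
  cases hfind : col.find? (fun x =>
      decide ((col.countP (fun y => decide (y < x)) : Int) ≤ (k : Int) ∧
              (k : Int) < (col.countP (fun y => decide (y < x)) : Int) +
                  (col.countP (fun y => decide (y = x)) : Int))) with
  | none =>
    exfalso
    have hnone := List.find?_eq_none.mp hfind ((pvSorted col)[k]'hks) hx0mem
    simp only [decide_eq_true_eq, not_and, not_lt] at hnone
    have h1 : (col.countP (fun y => decide (y < (pvSorted col)[k]'hks)) : Int) ≤ (k : Int) := by
      exact_mod_cast hrank.1
    have h2 := hnone h1
    have h3 := hrank.2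
    omega
  | some x =>
    have hpx := List.find?_some hfind
    simp only [decide_eq_true_eq] at hpx
    apply pv_rank_unique col k x ((pvSorted col)[k]'hks) _ hrank
    constructor
    · exact_mod_cast hpx.1
    · exact_mod_cast hpx.2

-- per-column agreement of the two medium computations
theorem pv_column_eq (col : List Int) (hcol : col ≠ []) :
    PySem.Int.floordiv
      (PySem.List.pyGetD (PySem.List.sorted col (fun x => x) false)
         (PySem.Int.floordiv (((PySem.List.sorted col (fun x => x) false).length : Int)) 2) 0 +
       PySem.List.pyGetD (PySem.List.sorted col (fun x => x) false)
         (PySem.Int.floordiv (((PySem.List.sorted col (fun x => x) false).length : Int)) 2 - 1) 0) 2 =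
    PySem.Int.floordiv
      (pvSelect col (PySem.Int.floordiv ((col.length : Int)) 2) +
       pvSelect col (max (PySem.Int.floordiv ((col.length : Int)) 2 - 1) 0)) 2 := by
  show PySem.Int.floordiv
      (PySem.List.pyGetD (pvSorted col)
         (PySem.Int.floordiv (((pvSorted col).length : Int)) 2) 0 +
       PySem.List.pyGetD (pvSorted col)
         (PySem.Int.floordiv (((pvSorted col).length : Int)) 2 - 1) 0) 2 =
    PySem.Int.floordiv
      (pvSelect col (PySem.Int.floordiv ((col.length : Int)) 2) +
       pvSelect col (max (PySem.Int.floordiv ((col.length : Int)) 2 - 1) 0)) 2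
  have hn : 0 < col.length := List.length_pos_iff.mpr hcol
  have hslen : (pvSorted col).length = col.length :=
    PySem.List.length_sorted col (fun x => x) false
  have hj : PySem.Int.floordiv (((pvSorted col).length : Int)) 2 = ((col.length / 2 : Nat) : Int) := by
    rw [hslen]; exact PySem.Int.floordiv_natCast col.length 2
  have hjc : PySem.Int.floordiv ((col.length : Int)) 2 = ((col.length / 2 : Nat) : Int) :=
    PySem.Int.floordiv_natCast col.length 2
  have hhalf : col.length / 2 < col.length := Nat.div_lt_self hn (by omega)
  have hs1 : PySem.List.pyGetD (pvSorted col)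
      (PySem.Int.floordiv (((pvSorted col).length : Int)) 2) 0 =
      (pvSorted col)[col.length / 2]'(by omega) := by
    rw [hj, PySem.List.pyGetD_natCast]
    exact List.getD_eq_getElem _ _ (by omega)
  have hb1 : pvSelect col (PySem.Int.floordiv ((col.length : Int)) 2) =
      (pvSorted col)[col.length / 2]'(by omega) := by
    rw [hjc]
    exact pv_select_eq_sorted col (col.length / 2) hhalf
  by_cases h1 : col.length = 1
  · -- single-element column: A indexes l[-1], which wraps to the only element
    have hidx : PySem.Int.floordiv (((pvSorted col).length : Int)) 2 - 1 = -1 := by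
      rw [hj, h1]; norm_num
    have hs2 : PySem.List.pyGetD (pvSorted col)
        (PySem.Int.floordiv (((pvSorted col).length : Int)) 2 - 1) 0 =
        (pvSorted col)[col.length / 2]'(by omega) := by
      rw [hidx, PySem.List.pyGetD_neg_one (pvSorted col) 0
        (by intro hnil; rw [hnil] at hslen; simp at hslen; omega)]
      rw [List.getLast_eq_getElem]
      congr 1
      omega
    have hmax : max (PySem.Int.floordiv ((col.length : Int)) 2 - 1) 0 =
        ((col.length / 2 : Nat) : Int) := by
      rw [hjc, h1]; norm_num
    have hb2 : pvSelect col (max (PySem.Int.floordiv ((col.length : Int)) 2 - 1) 0) =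
        (pvSorted col)[col.length / 2]'(by omega) := by
      rw [hmax]
      exact pv_select_eq_sorted col (col.length / 2) hhalf
    rw [hs1, hs2, hb1, hb2]
  · -- at least two elements: both indices are nonnegative
    have h2 : 2 ≤ col.length := by omega
    have hhalf1 : 1 ≤ col.length / 2 := by omega
    have hcast : PySem.Int.floordiv (((pvSorted col).length : Int)) 2 - 1 =
        ((col.length / 2 - 1 : Nat) : Int) := by
      rw [hj]; push_cast [hhalf1]; ring
    have hcastc : max (PySem.Int.floordiv ((col.length : Int)) 2 - 1) 0 =
        ((col.length / 2 - 1 : Nat) : Int) := by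
      rw [hjc]
      have h1' : (1 : Int) ≤ ((col.length / 2 : Nat) : Int) := by exact_mod_cast hhalf1
      rw [max_eq_left (by omega)]
      push_cast [hhalf1]; ring
    have hs2 : PySem.List.pyGetD (pvSorted col)
        (PySem.Int.floordiv (((pvSorted col).length : Int)) 2 - 1) 0 =
        (pvSorted col)[col.length / 2 - 1]'(by omega) := by
      rw [hcast, PySem.List.pyGetD_natCast]
      exact List.getD_eq_getElem _ _ (by omega)
    have hb2 : pvSelect col (max (PySem.Int.floordiv ((col.length : Int)) 2 - 1) 0) =
        (pvSorted col)[col.length / 2 - 1]'(by omega) := by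
      rw [hcastc]
      exact pv_select_eq_sorted col (col.length / 2 - 1) (by omega)
    rw [hs1, hs2, hb1, hb2]

theorem pv_zipStar_eq (n : Nat) :
    ∀ oss : List (List Int), oss ≠ [] → (∀ r ∈ oss, n ≤ r.length) →
      (oss.headD []).length = n →
      pvZipStar oss = (List.range n).map (fun k => oss.map (fun r => r.getD k 0)) := by
  induction n with
  | zero =>
    intro oss hne _ hhead
    cases oss with
    | nil => exact absurd rfl hne
    | cons r rs =>
      simp only [List.headD_cons] at hhead
      have : r = [] := List.length_eq_zero_iff.mp hhead
      subst this
      simp [pvZipStar]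
  | succ n ih =>
    intro oss hne hlen hhead
    cases oss with
    | nil => exact absurd rfl hne
    | cons r rs =>
      simp only [List.headD_cons] at hhead
      have hnoempty : ((r :: rs).any (fun t => t.isEmpty)) = false := by
        rw [List.any_eq_false]
        intro t ht
        have := hlen t ht
        simp only [List.isEmpty_iff]
        intro htnil
        rw [htnil] at this
        simp at this
      rw [pvZipStar, if_neg (by simp [hnoempty])]
      have hih := ih ((r :: rs).map List.tail) (by simp)
        (by
          intro t' ht'
          obtain ⟨t, ht, rfl⟩ := List.mem_map.mp ht'
          have := hlen t ht
          simp [List.length_tail]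
          omega)
        (by simp [List.length_tail, hhead])
      rw [hih, List.range_succ_eq_map]
      conv_rhs => rw [List.map_cons]
      congr 1
      · simp only [List.map_cons]
        congr 1
        · cases r <;> simp
        · apply List.map_congr_left
          intro t _
          cases t <;> simp
      · conv_rhs => rw [List.map_map]
        apply List.map_congr_left
        intro k _
        simp only [Function.comp_apply, List.map_map]
        apply List.map_congr_left
        intro t _
        cases t <;> simp

-- the appended element of each loop body, as proof-side helpers
def pvMedA (oss_steps_all : List (List Int)) (k : Int) : Int :=
  PySem.Int.floordiv
    (PySem.List.pyGetD (PySem.List.sorted ((PySem.List.pyRange 0 (oss_steps_all.length : Int) 1).foldl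
      (fun l i => l ++ [PySem.List.pyGetD (PySem.List.pyGetD oss_steps_all i []) k 0]) []) (fun x => x) false)
       (PySem.Int.floordiv (((PySem.List.sorted ((PySem.List.pyRange 0 (oss_steps_all.length : Int) 1).foldl
      (fun l i => l ++ [PySem.List.pyGetD (PySem.List.pyGetD oss_steps_all i []) k 0]) []) (fun x => x) false).length : Int)) 2) 0 +
     PySem.List.pyGetD (PySem.List.sorted ((PySem.List.pyRange 0 (oss_steps_all.length : Int) 1).foldl
      (fun l i => l ++ [PySem.List.pyGetD (PySem.List.pyGetD oss_steps_all i []) k 0]) []) (fun x => x) false)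
       (PySem.Int.floordiv (((PySem.List.sorted ((PySem.List.pyRange 0 (oss_steps_all.length : Int) 1).foldl
      (fun l i => l ++ [PySem.List.pyGetD (PySem.List.pyGetD oss_steps_all i []) k 0]) []) (fun x => x) false).length : Int)) 2 - 1) 0) 2

def pvMedB (col : List Int) : Int :=
  PySem.Int.floordiv
    (pvSelect col (PySem.Int.floordiv ((col.length : Int)) 2) +
     pvSelect col (max (PySem.Int.floordiv ((col.length : Int)) 2 - 1) 0)) 2

theorem pv_med_eq (oss : List (List Int)) (hne : oss ≠ []) (k : Nat) :
    pvMedA oss (k : Int) = pvMedB (oss.map (fun r => r.getD k 0)) := by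
  have hinner : (PySem.List.pyRange 0 (oss.length : Int) 1).foldl
      (fun l i => l ++ [PySem.List.pyGetD (PySem.List.pyGetD oss i []) ((k : Nat) : Int) 0]) [] =
      oss.map (fun r => r.getD k 0) := by
    rw [PySem.List.foldl_pyRange_zero_pyGetD' oss []
      (fun l row => l ++ [PySem.List.pyGetD row ((k : Nat) : Int) 0]) []]
    rw [PySem.List.foldl_append_singleton_eq_map]
    simp only [List.nil_append]
    apply List.map_congr_left
    intro r _
    rw [PySem.List.pyGetD_natCast]
  have hcolne : (oss.map (fun r => r.getD k 0)) ≠ [] := by simpa using hne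
  unfold pvMedA pvMedB
  rw [hinner]
  rw [pv_column_eq (oss.map (fun r => r.getD k 0)) hcolne]

-- ===== VERDICT (by name: the statement is the Claim_ definition above) =====
set_option maxHeartbeats 1000000 in
theorem cal_medium_spec : Claim_equal_cal_medium := by
  intro oss _ hpre
  obtain ⟨hne, hlen⟩ := hpre
  unfold Spec_cal_medium cal_medium cal_medium_alt
  rw [pv_zipStar_eq (oss.headD []).length oss hne hlen rfl]
  have h0 : (PySem.List.pyGetD oss 0 []).length = (oss.headD []).length := by
    rw [PySem.List.pyGetD_zero]
    cases oss with
    | nil => exact absurd rfl hne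
    | cons r rs => simp
  rw [h0]
  rw [show pvLoopA oss = (fun acc k => acc ++ [pvMedA oss k]) from rfl]
  rw [show pvLoopB = (fun acc col => acc ++ [pvMedB col]) from rfl]
  rw [PySem.List.foldl_append_singleton_eq_map, PySem.List.foldl_append_singleton_eq_map]
  simp only [List.nil_append]
  rw [PySem.List.pyRange_zero_nat (oss.headD []).length, List.map_map, List.map_map]
  apply List.map_congr_left
  intro k hk
  simp only [Function.comp_apply]
  exact pv_med_eq oss hne k
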